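-- pv_equiv track=rewrite | github.com/e-south/dnadesign | src/dnadesign/permuter/src/protocols/scan_stem_loop.py | _longest_match_run
-- ===== SOURCE A (Python) =====
-- RC = {"A": "T", "T": "A", "C": "G", "G": "C"}
--
-- def _longest_match_run(up: str, down: str) -> int:
--     k = min(len(up), len(down))
--     best = 0
--     run = 0
--     for i in range(k):
--         u = up[-1 - i]
--         d = down[i]
--         if d == RC[u]:
--             run += 1
--             if run > best:
--                 best = run
--         else:
--             run = 0
--     return best
-- ===== SOURCE B (Python) =====
-- RC = {"A": "T", "T": "A", "C": "G", "G": "C"}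
--
-- def _longest_match_run(up: str, down: str) -> int:
--     # Collect the mismatch positions (with sentinels -1 and k); the answer is
--     # the widest gap between consecutive mismatch boundaries.
--     k = min(len(up), len(down))
--     cuts = [-1] + [i for i in range(k) if down[i] != RC[up[-1 - i]]] + [k]
--     return max(b - a - 1 for a, b in zip(cuts, cuts[1:]))
-- ===== Notes on version B (the rewrite author's own statement) =====
-- stated objective: alternative
-- what changed: B replaces A's running best/run counter state machine by collecting all mismatch positions (with sentinel boundaries -1 and k) and returning the maximum gap between consecutive boundaries.
import Mathlib
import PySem

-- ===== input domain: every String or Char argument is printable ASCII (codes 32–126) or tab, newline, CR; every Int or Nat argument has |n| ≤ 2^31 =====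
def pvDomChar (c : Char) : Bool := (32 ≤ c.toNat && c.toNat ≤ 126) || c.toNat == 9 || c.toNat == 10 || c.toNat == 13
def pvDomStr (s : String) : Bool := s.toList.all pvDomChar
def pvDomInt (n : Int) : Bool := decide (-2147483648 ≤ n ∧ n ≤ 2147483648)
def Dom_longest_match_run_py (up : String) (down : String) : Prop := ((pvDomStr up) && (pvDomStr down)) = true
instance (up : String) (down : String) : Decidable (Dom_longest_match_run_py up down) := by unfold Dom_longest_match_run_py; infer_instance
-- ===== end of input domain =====

-- B finds the longest complementary run as the widest gap between consecutive
-- mismatch positions (with sentinels), instead of A's best/run counter loop.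

-- the module constant RC = {"A": "T", "T": "A", "C": "G", "G": "C"} (shared context of A and B)
def rcDict : PySem.Dict Char Char := PySem.Dict.ofList [('A', 'T'), ('T', 'A'), ('C', 'G'), ('G', 'C')]

-- ===== PORT A =====
-- literal port of A's loop; RC[u] is Dict.get?; under Pre_ it is always `some _`
-- (outside Pre_ Python raises KeyError, where the port's Option-compare is just false).
def longest_match_run_py (up : String) (down : String) : Int :=
  let l1 := up.toList
  let l2 := down.toList
  let k : Int := min (l1.length : Int) (l2.length : Int)
  let st := (PySem.List.pyRange 0 k 1).foldl
    (fun (st : Int × Int) (i : Int) =>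
      let u := PySem.List.pyGetD l1 (-1 - i) ' '
      let d := PySem.List.pyGetD l2 i ' '
      if some d == PySem.Dict.get? rcDict u then
        (if st.2 + 1 > st.1 then st.2 + 1 else st.1, st.2 + 1)
      else (st.1, 0)) ((0 : Int), (0 : Int))
  st.1

-- ===== PORT B =====
def longest_match_run_py_alt (up : String) (down : String) : Int :=
  let l1 := up.toList
  let l2 := down.toList
  let k : Int := min (l1.length : Int) (l2.length : Int)
  let cuts : List Int :=
    [-1] ++ ((PySem.List.pyRange 0 k 1).filter
      (fun (i : Int) =>
        !(some (PySem.List.pyGetD l2 i ' ') ==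
          PySem.Dict.get? rcDict (PySem.List.pyGetD l1 (-1 - i) ' ')))) ++ [k]
  let gaps := ((cuts.zip (cuts.drop 1)).map (fun p => p.2 - p.1 - 1))
  (PySem.List.max? gaps (fun x => x)).getD 0

-- ===== PRECONDITION & SPEC =====
-- Pre_ excludes exactly the inputs where Python A raises KeyError: some scanned
-- character of `up` (one of its last min(len(up),len(down)) characters) is not a key of RC.
def Pre_longest_match_run_py (up : String) (down : String) : Prop :=
  ((up.toList.drop (up.toList.length - min up.toList.length down.toList.length)).all
    (fun c => c == 'A' || c == 'T' || c == 'C' || c == 'G')) = true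
instance (up : String) (down : String) : Decidable (Pre_longest_match_run_py up down) := by
  unfold Pre_longest_match_run_py; infer_instance

def pvWitness_longest_match_run_py : String × String := ("ACGT", "ACGT")

def Spec_longest_match_run_py (up : String) (down : String) (out : Int) : Prop := out = longest_match_run_py_alt up down
instance (up : String) (down : String) (out : Int) : Decidable (Spec_longest_match_run_py up down out) := by unfold Spec_longest_match_run_py; infer_instance

-- ===== CLAIM (what is proved, stated in full; the proofs are below) =====
def Claim_equal_longest_match_run_py : Prop := ∀ (up : String) (down : String), Dom_longest_match_run_py up down → Pre_longest_match_run_py up down → Spec_longest_match_run_py up down (longest_match_run_py up down)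

-- ===== LEMMAS AND PROOFS =====

-- the per-index match test shared by both loop shapes
def pvP (up down : String) : Int → Bool := fun i =>
  some (PySem.List.pyGetD down.toList i ' ') ==
    PySem.Dict.get? rcDict (PySem.List.pyGetD up.toList (-1 - i) ' ')

-- A's loop body, with the per-index match test abstracted as `p`.
def pvStepA (p : Int → Bool) (st : Int × Int) (i : Int) : Int × Int :=
  if p i then (if st.2 + 1 > st.1 then st.2 + 1 else st.1, st.2 + 1) else (st.1, 0)

-- maximum gap `x - prev - 1` between consecutive boundaries, given the previous boundary
def pvGm (prev : Int) : List Int → Int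
  | [] => 0
  | [x] => x - prev - 1
  | x :: y :: xs => max (x - prev - 1) (pvGm x (y :: xs))

lemma pvGm_cons (prev x : Int) (xs : List Int) (h : xs ≠ []) :
    pvGm prev (x :: xs) = max (x - prev - 1) (pvGm x xs) := by
  cases xs with
  | nil => exact absurd rfl h
  | cons y ys => rfl

lemma pvGm_ge_head (prev x : Int) (xs : List Int) :
    x - prev - 1 ≤ pvGm prev (x :: xs) := by
  cases xs with
  | nil => simp [pvGm]
  | cons y ys => exact le_max_left _ _

lemma pvFoldlMax (xs : List Int) (prev a : Int) (h : xs ≠ []) :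
    (((prev :: xs).zip xs).map (fun p => p.2 - p.1 - 1)).foldl max a
      = max a (pvGm prev xs) := by
  induction xs generalizing prev a with
  | nil => exact absurd rfl h
  | cons x rest ih =>
    cases rest with
    | nil => simp [pvGm, List.zip]
    | cons y ys =>
      have := ih (prev := x) (a := max a (x - prev - 1)) (by simp)
      simp only [List.zip_cons_cons, List.map_cons, List.foldl_cons] at this ⊢
      rw [this, pvGm_cons prev x (y :: ys) (by simp), max_assoc]

lemma pvMaxGaps (xs : List Int) (prev : Int) (h : xs ≠ []) :
    (PySem.List.max? (((prev :: xs).zip xs).map (fun p => p.2 - p.1 - 1)) (fun x => x)).getD 0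
      = pvGm prev xs := by
  cases xs with
  | nil => exact absurd rfl h
  | cons x rest =>
    simp only [List.zip_cons_cons, List.map_cons, PySem.List.max?_id_cons, Option.getD_some]
    cases rest with
    | nil => simp [pvGm, List.zip]
    | cons y ys =>
      rw [pvFoldlMax (y :: ys) x (x - prev - 1) (by simp),
          pvGm_cons prev x (y :: ys) (by simp)]

-- every element of `filter q (pyRange a k 1) ++ [k]` is ≥ a, provided a ≤ k
lemma pvHead_ge (a k : Int) (hak : a ≤ k) (q : Int → Bool) (x : Int) (xs : List Int)
    (hx : ((PySem.List.pyRange a k 1).filter q) ++ [k] = x :: xs) : a ≤ x := by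
  cases hf : (PySem.List.pyRange a k 1).filter q with
  | nil => rw [hf] at hx; simp at hx; omega
  | cons f fs =>
    rw [hf] at hx
    have hmem : f ∈ (PySem.List.pyRange a k 1).filter q := by rw [hf]; exact List.mem_cons_self
    have : f ∈ PySem.List.pyRange a k 1 := List.mem_of_mem_filter hmem
    have := (PySem.List.mem_pyRange_one).mp this
    simp at hx
    omega

-- main invariant: A's counter loop from (best, run) over range(a, k) computes
-- `max best` of the widest boundary gap, with previous boundary a - run - 1.
lemma pvKey (p : Int → Bool) (k : Int) : ∀ (n : Nat) (a best run : Int),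
    a + n = k → 0 ≤ run → run ≤ best →
    ((PySem.List.pyRange a k 1).foldl (pvStepA p) (best, run)).1
      = max best (pvGm (a - run - 1) (((PySem.List.pyRange a k 1).filter (fun i => !(p i))) ++ [k])) := by
  intro n
  induction n with
  | zero =>
    intro a best run hn h0 hrb
    have hak : k ≤ a := by omega
    rw [PySem.List.pyRange_one_eq_nil hak]
    simp [pvGm]
    omega
  | succ m ih =>
    intro a best run hn h0 hrb
    have hlt : a < k := by omega
    rw [PySem.List.pyRange_one_cons hlt]
    simp only [List.foldl_cons, List.filter_cons, pvStepA]
    by_cases hp : p a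
    · -- match at a: run grows, position a is not a cut
      simp only [hp, Bool.not_true, if_true, Bool.false_eq_true, if_false]
      have hrec := ih (a + 1) (if run + 1 > best then run + 1 else best) (run + 1)
        (by omega) (by omega) (by split <;> omega)
      simp only [show a + 1 - (run + 1) - 1 = a - run - 1 by ring] at hrec
      rw [hrec]
      by_cases hbig : run + 1 > best
      · simp only [if_pos hbig]
        -- the next gap is at least run + 1, so `max` absorbs the new best
        cases hx : ((PySem.List.pyRange (a+1) k 1).filter (fun i => !(p i))) ++ [k] with
        | nil => simp at hx
        | cons x xs =>
          have hxa : a + 1 ≤ x := pvHead_ge (a+1) k (by omega) _ x xs hx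
          have h1 : run + 1 ≤ pvGm (a - run - 1) (x :: xs) := by
            have := pvGm_ge_head (a - run - 1) x xs
            omega
          omega
      · simp only [if_neg hbig]
    · -- mismatch at a: run resets, a is a cut
      simp only [Bool.not_eq_true] at hp
      simp only [hp, Bool.not_false, if_true, Bool.false_eq_true, if_false]
      have hrec := ih (a + 1) best 0 (by omega) (by omega) (by omega)
      simp only [show a + 1 - 0 - 1 = a by ring] at hrec
      rw [List.cons_append, pvGm_cons (a - run - 1) a _ (by simp), hrec]
      have : a - (a - run - 1) - 1 = run := by ring
      rw [this]
      omega

-- the boundary list B's port builds after the leading -1 (proof-only helper)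
def pvCutsTail (up down : String) : List Int :=
  ((PySem.List.pyRange 0 (min (up.toList.length : Int) (down.toList.length : Int)) 1).filter
    (fun i => !(pvP up down i))) ++ [min (up.toList.length : Int) (down.toList.length : Int)]

lemma pvGm_nonneg (k : Int) (hk : 0 ≤ k) (q : Int → Bool) :
    0 ≤ pvGm (-1) (((PySem.List.pyRange 0 k 1).filter q) ++ [k]) := by
  cases hx : ((PySem.List.pyRange 0 k 1).filter q) ++ [k] with
  | nil => simp at hx
  | cons x xs =>
    have hxa : (0 : Int) ≤ x := pvHead_ge 0 k hk q x xs hx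
    have := pvGm_ge_head (-1) x xs
    omega

-- ===== VERDICT (by name: the statement is the Claim_ definition above) =====
theorem longest_match_run_py_spec : Claim_equal_longest_match_run_py := by
  intro up down _ _
  show longest_match_run_py up down = longest_match_run_py_alt up down
  have hk0 : (0 : Int) ≤ min (up.toList.length : Int) (down.toList.length : Int) := by positivity
  have hA : longest_match_run_py up down
      = ((PySem.List.pyRange 0 (min (up.toList.length : Int) (down.toList.length : Int)) 1).foldl
          (pvStepA (pvP up down)) ((0 : Int), (0 : Int))).1 := rfl
  have hB : longest_match_run_py_alt up down
      = (PySem.List.max?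
          ((((-1 : Int) :: pvCutsTail up down).zip (pvCutsTail up down)).map
            (fun q => q.2 - q.1 - 1)) (fun x => x)).getD 0 := rfl
  have hne : pvCutsTail up down ≠ [] := by simp [pvCutsTail]
  have hmain := pvKey (pvP up down) (min (up.toList.length : Int) (down.toList.length : Int))
    (min (up.toList.length : Int) (down.toList.length : Int)).toNat 0 0 0 (by omega) (by omega) (by omega)
  simp only [show (0 : Int) - 0 - 1 = -1 by ring] at hmain
  have hct : (((PySem.List.pyRange 0 (min (up.toList.length : Int) (down.toList.length : Int)) 1).filter
      (fun i => !(pvP up down i))) ++ [min (up.toList.length : Int) (down.toList.length : Int)])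
      = pvCutsTail up down := rfl
  rw [hct] at hmain
  have hpos := pvGm_nonneg (min (up.toList.length : Int) (down.toList.length : Int)) hk0
    (fun i => !(pvP up down i))
  rw [hct] at hpos
  rw [hA, hB, hmain, pvMaxGaps (pvCutsTail up down) (-1) hne]
  omega
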